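-- pv_equiv track=rewrite | github.com/anr-bmbf-pivot/Artifacts-CoNEXT23-DoC | 06-07-evaluation/scripts/plots/plot_pkt_sizes_quic.py | quics_size_increment
-- ===== SOURCE A (Python) =====
-- def quics_size_increment(start, msg):
--     increment = start
--     yield increment
--     # destination connection id
--     for _ in range(20):
--         increment += 1
--         yield increment
--     # packet number
--     for _ in range(3):
--         increment += 1
--         yield increment
--     if msg != "query":
--         # manipulate ACK frame
--         # Largest Acknowledged
--         length = 1
--         while length < 8:
--             increment += length
--             yield increment
--             length *= 2
--         # ACK delay
--         increment += 1
--         yield increment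
--         # manipulate HANDSHAKE DONE FRAME
--         increment += 1
--         yield increment
--     # manipulate STREAM frame
--     # Stream ID
--     length = 1
--     while length < 8:
--         increment += length
--         yield increment
--         length *= 2
--     # Offset
--     increment += 1
--     yield increment
-- ===== SOURCE B (Python) =====
-- def quics_size_increment(start, msg):
--     # flat table of increment deltas, then one accumulation pass
--     deltas = [1] * 23  # 20 destination-connection-id bytes + 3 packet-number bytes
--     if msg != "query":
--         deltas += [1, 2, 4, 1, 1]  # Largest Acknowledged doubling, ACK delay, HANDSHAKE DONE
--     deltas += [1, 2, 4, 1]  # Stream ID doubling, Offset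
--     acc = start
--     out = [acc]
--     for d in deltas:
--         acc += d
--         out.append(acc)
--     yield from out
-- ===== Notes on version B (the rewrite author's own statement) =====
-- stated objective: simpler
-- what changed: Replaces the interleaved yield-inside-loops generator with a precomputed flat delta table consumed by a single accumulation pass.
import Mathlib
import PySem

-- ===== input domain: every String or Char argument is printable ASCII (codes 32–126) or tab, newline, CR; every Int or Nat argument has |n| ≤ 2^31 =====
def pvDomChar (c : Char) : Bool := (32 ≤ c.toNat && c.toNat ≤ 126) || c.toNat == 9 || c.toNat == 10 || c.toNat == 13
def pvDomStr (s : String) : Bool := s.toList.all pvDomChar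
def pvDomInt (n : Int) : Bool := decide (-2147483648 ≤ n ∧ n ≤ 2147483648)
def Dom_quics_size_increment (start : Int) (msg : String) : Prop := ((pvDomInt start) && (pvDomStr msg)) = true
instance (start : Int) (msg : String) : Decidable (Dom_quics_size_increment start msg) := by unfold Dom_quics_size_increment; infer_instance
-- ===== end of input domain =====

-- B replaces A's interleaved yield-inside-loops structure by a flat delta table and one accumulation pass (objective: simpler).

-- ===== PORT A =====
-- the 'while length < 8' loops of A; fuel only makes the recursion total (8 iterations always suffice)
def pvAWhile : Nat → Int → Int → List Int → Int × List Int
  | 0, _, inc, acc => (inc, acc)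
  | fuel + 1, length, inc, acc =>
    if length < 8 then pvAWhile fuel (length * 2) (inc + length) (acc ++ [inc + length])
    else (inc, acc)

def quics_size_increment (start : Int) (msg : String) : List Int :=
  let inc : Int := start
  let out : List Int := [inc]
  -- for _ in range(20): increment += 1; yield increment
  let (inc, out) := (PySem.List.pyRange 0 20 1).foldl
    (fun (p : Int × List Int) _ => (p.1 + 1, p.2 ++ [p.1 + 1])) (inc, out)
  -- for _ in range(3)
  let (inc, out) := (PySem.List.pyRange 0 3 1).foldl
    (fun (p : Int × List Int) _ => (p.1 + 1, p.2 ++ [p.1 + 1])) (inc, out)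
  let (inc, out) :=
    if msg ≠ "query" then
      -- while length < 8 (Largest Acknowledged)
      let (inc, out) := pvAWhile 8 1 inc out
      -- ACK delay
      let inc := inc + 1
      let out := out ++ [inc]
      -- HANDSHAKE DONE
      let inc := inc + 1
      let out := out ++ [inc]
      (inc, out)
    else (inc, out)
  -- while length < 8 (Stream ID)
  let (inc, out) := pvAWhile 8 1 inc out
  -- Offset
  let inc := inc + 1
  let out := out ++ [inc]
  out

-- ===== PORT B =====
def quics_size_increment_alt (start : Int) (msg : String) : List Int :=
  let deltas : List Int :=
    List.replicate 23 1
      ++ (if msg ≠ "query" then [1, 2, 4, 1, 1] else [])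
      ++ [1, 2, 4, 1]
  (deltas.foldl (fun (p : Int × List Int) d => (p.1 + d, p.2 ++ [p.1 + d])) (start, [start])).2

-- ===== PRECONDITION & SPEC =====
def Spec_quics_size_increment (start : Int) (msg : String) (out : List Int) : Prop := out = quics_size_increment_alt start msg
instance (start : Int) (msg : String) (out : List Int) : Decidable (Spec_quics_size_increment start msg out) := by unfold Spec_quics_size_increment; infer_instance

-- ===== CLAIM (what is proved, stated in full; the proofs are below) =====
def Claim_equal_quics_size_increment : Prop := ∀ (start : Int) (msg : String), Dom_quics_size_increment start msg → Spec_quics_size_increment start msg (quics_size_increment start msg)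

-- ===== LEMMAS AND PROOFS =====

-- ===== VERDICT (by name: the statement is the Claim_ definition above) =====
theorem quics_size_increment_spec : Claim_equal_quics_size_increment := by
  intro start msg _
  unfold Spec_quics_size_increment quics_size_increment quics_size_increment_alt
  by_cases h : msg = "query" <;>
    simp [h, pvAWhile, PySem.List.pyRange, List.replicate, List.foldl, List.range_succ]
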